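-- pv_equiv track=rewrite | github.com/CFAndy/znet | src/deep/unet/utils.py | output_size_for_input
-- ===== SOURCE A (Python) =====
-- import math
--
-- def output_size_for_input(in_size, depth, padding = True):
--     if padding == True:
--         for _ in range(depth - 1):
--             in_size = in_size // 2
--         for _ in range(depth - 1):
--             in_size = in_size * 2
--         return in_size
--     else:
--         in_size -= 4
--         for _ in range(depth - 1):
--             in_size = math.ceil((in_size - 2) / 2) + 1
--             in_size -= 4
--         for _ in range(depth - 1):
--             in_size = in_size * 2
--             in_size -= 4
--         return int(in_size)
-- ===== SOURCE B (Python) =====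
-- def output_size_for_input(in_size, depth, padding=True):
--     n = max(depth - 1, 0)
--     if padding:
--         # n repeated floor-halvings then n doublings = floor to a multiple of 2**n
--         return (in_size // (2 ** n)) * (2 ** n)
--     x = in_size - 4
--     # the parity-sensitive contracting recurrence, in exact int arithmetic:
--     # ceil((x-2)/2)+1-4 == ceil(x/2)-4 == -((-x)//2)-4
--     for _ in range(n):
--         x = -((-x) // 2) - 4
--     # n iterations of x -> 2*x-4 in closed form (fixed point 4)
--     return (x - 4) * (2 ** n) + 4
-- ===== Notes on version B (the rewrite author's own statement) =====
-- stated objective: simpler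
-- what changed: Both geometric loops are replaced by closed forms: the padding branch's halve-then-double loops become one floor to a multiple of 2**(depth-1), and the non-padding doubling loop becomes the affine closed form (x-4)*2**(depth-1)+4; only the parity-sensitive ceil recurrence remains a loop, rewritten in exact integer arithmetic instead of float math.ceil.
import Mathlib
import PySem

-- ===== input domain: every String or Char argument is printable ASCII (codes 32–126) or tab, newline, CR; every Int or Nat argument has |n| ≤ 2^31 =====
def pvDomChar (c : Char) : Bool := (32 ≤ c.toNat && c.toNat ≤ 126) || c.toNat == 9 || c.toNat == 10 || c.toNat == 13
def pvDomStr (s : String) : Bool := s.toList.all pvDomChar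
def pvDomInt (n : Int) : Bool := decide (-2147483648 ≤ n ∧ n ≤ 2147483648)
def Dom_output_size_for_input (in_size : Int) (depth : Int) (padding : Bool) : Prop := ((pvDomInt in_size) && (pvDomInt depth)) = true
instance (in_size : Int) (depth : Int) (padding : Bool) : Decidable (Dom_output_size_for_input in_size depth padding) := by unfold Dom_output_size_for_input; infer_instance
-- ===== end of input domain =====

-- B replaces A's geometric loops by closed forms (floor to a multiple of 2^(depth-1);
-- affine closed form for the doubling loop) and keeps only the parity-sensitive ceil
-- recurrence as a loop, in exact integer arithmetic; objective: simpler structure.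

-- ===== PORT A =====
-- for _ in range(depth-1): in_size = in_size // 2
def aHalveLoop : Nat → Int → Int
  | 0, x => x
  | n + 1, x => aHalveLoop n (Int.fdiv x 2)

-- for _ in range(depth-1): in_size = in_size * 2
def aDoubleLoop : Nat → Int → Int
  | 0, x => x
  | n + 1, x => aDoubleLoop n (x * 2)

-- for _ in range(depth-1): in_size = math.ceil((in_size-2)/2)+1; in_size -= 4
-- (math.ceil((x-2)/2) is exact on the admitted magnitudes; ceil(a/2) = -((-a) fdiv 2))
def aCeilLoop : Nat → Int → Int
  | 0, x => x
  | n + 1, x => aCeilLoop n ((-(Int.fdiv (-(x - 2)) 2) + 1) - 4)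

-- for _ in range(depth-1): in_size = in_size * 2; in_size -= 4
def aDouble4Loop : Nat → Int → Int
  | 0, x => x
  | n + 1, x => aDouble4Loop n (x * 2 - 4)

def output_size_for_input (in_size : Int) (depth : Int) (padding : Bool) : Int :=
  if padding = true then
    aDoubleLoop (depth - 1).toNat (aHalveLoop (depth - 1).toNat in_size)
  else
    aDouble4Loop (depth - 1).toNat (aCeilLoop (depth - 1).toNat (in_size - 4))

-- ===== PORT B =====
-- for _ in range(n): x = -((-x) // 2) - 4
def bCeilLoop : Nat → Int → Int
  | 0, x => x
  | n + 1, x => bCeilLoop n (-(Int.fdiv (-x) 2) - 4)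

def output_size_for_input_alt (in_size : Int) (depth : Int) (padding : Bool) : Int :=
  let n : Nat := (max (depth - 1) 0).toNat
  if padding then
    (Int.fdiv in_size (2 ^ n)) * 2 ^ n
  else
    (bCeilLoop n (in_size - 4) - 4) * 2 ^ n + 4

-- ===== PRECONDITION & SPEC =====
def Spec_output_size_for_input (in_size : Int) (depth : Int) (padding : Bool) (out : Int) : Prop := out = output_size_for_input_alt in_size depth padding
instance (in_size : Int) (depth : Int) (padding : Bool) (out : Int) : Decidable (Spec_output_size_for_input in_size depth padding out) := by unfold Spec_output_size_for_input; infer_instance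

-- ===== CLAIM (what is proved, stated in full; the proofs are below) =====
def Claim_equal_output_size_for_input : Prop := ∀ (in_size : Int) (depth : Int) (padding : Bool), Dom_output_size_for_input in_size depth padding → Spec_output_size_for_input in_size depth padding (output_size_for_input in_size depth padding)

-- ===== LEMMAS AND PROOFS =====
theorem aHalveLoop_eq (n : Nat) : ∀ x : Int, aHalveLoop n x = Int.fdiv x (2 ^ n) := by
  induction n with
  | zero => intro x; simp [aHalveLoop, Int.fdiv_one]
  | succ n ih =>
    intro x
    rw [aHalveLoop, ih, Int.fdiv_fdiv_eq_fdiv_mul _ (by norm_num) (by positivity)]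
    ring_nf

theorem aDoubleLoop_eq (n : Nat) : ∀ x : Int, aDoubleLoop n x = x * 2 ^ n := by
  induction n with
  | zero => intro x; simp [aDoubleLoop]
  | succ n ih => intro x; rw [aDoubleLoop, ih]; ring

theorem aCeilLoop_eq (n : Nat) : ∀ x : Int, aCeilLoop n x = bCeilLoop n x := by
  induction n with
  | zero => intro x; rfl
  | succ n ih =>
    intro x
    rw [aCeilLoop, bCeilLoop, ih]
    congr 1
    rw [Int.fdiv_eq_ediv_of_nonneg _ (by norm_num), Int.fdiv_eq_ediv_of_nonneg _ (by norm_num)]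
    omega

theorem aDouble4Loop_eq (n : Nat) : ∀ x : Int, aDouble4Loop n x = (x - 4) * 2 ^ n + 4 := by
  induction n with
  | zero => intro x; simp [aDouble4Loop]
  | succ n ih => intro x; rw [aDouble4Loop, ih]; ring

theorem toNat_max_zero (a : Int) : (max a 0).toNat = a.toNat := by omega

-- ===== VERDICT (by name: the statement is the Claim_ definition above) =====
theorem output_size_for_input_spec : Claim_equal_output_size_for_input := by
  intro in_size depth padding _
  unfold Spec_output_size_for_input output_size_for_input output_size_for_input_alt
  rw [toNat_max_zero]
  cases padding with
  | true => simp [aDoubleLoop_eq, aHalveLoop_eq]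
  | false => simp [aDouble4Loop_eq, aCeilLoop_eq]
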